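-- pv_equiv track=rewrite | github.com/Milestoneigroup/data-builder | scrapers/load_photographers_from_csv.py | _assign_deterministic_ids
-- ===== SOURCE A (Python) =====
-- from typing import Any
--
-- def _norm_state_key(state_db: str | None) -> str | None:
--     if state_db is None:
--         return None
--     s = state_db.strip().upper()
--     return s if s else None
--
-- def _natural_key_from_payload(payload: dict[str, Any]) -> tuple[str, str | None]:
--     return (
--         str(payload["business_name"]),
--         _norm_state_key(payload.get("state")),
--     )
--
-- def _assign_deterministic_ids(
--     parsed_rows: list[tuple[dict[str, Any], str]],
-- ) -> dict[tuple[str, str | None], str]: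
--     """Stable PHO-{STATE|NAT}-{nnnnnn} from sorted order within id prefix."""
--     by_prefix: dict[str, list[tuple[str, str | None]]] = {}
--     for payload, id_prefix in parsed_rows:
--         nk = _natural_key_from_payload(payload)
--         by_prefix.setdefault(id_prefix, []).append(nk)
--
--     for prefix in by_prefix:
--         by_prefix[prefix].sort(key=lambda x: (x[0].lower(), x[1] or ""))
--
--     out: dict[tuple[str, str | None], str] = {}
--     for prefix, keys in by_prefix.items():
--         for i, nk in enumerate(keys, start=1):
--             out[nk] = f"PHO-{prefix}-{i:06d}"
--     return out
-- ===== SOURCE B (Python) =====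
-- def _assign_deterministic_ids(parsed_rows):
--     """Same mapping, built from deduped prefixes + per-prefix filtering instead of a dict of lists."""
--     nks = []
--     for payload, id_prefix in parsed_rows:
--         bn = str(payload["business_name"])
--         st = payload.get("state")
--         if st is not None:
--             st = st.strip().upper() or None
--         nks.append(((bn, st), id_prefix))
--     prefixes = list(dict.fromkeys(p for _, p in nks))
--     out = {}
--     for prefix in prefixes:
--         group = sorted((nk for nk, p in nks if p == prefix),
--                        key=lambda x: (x[0].lower(), x[1] or ""))
--         for i, nk in enumerate(group, start=1):
--             out[nk] = f"PHO-{prefix}-{i:06d}"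
--     return out
-- ===== Notes on version B (the rewrite author's own statement) =====
-- stated objective: alternative
-- what changed: B drops A's dict-of-lists grouping (setdefault/append then per-key in-place sort) and instead builds one flat (natural-key, prefix) list, dedups the prefixes in first-seen order, and for each prefix filters, sorts and enumerates that flat list directly.
import Mathlib
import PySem

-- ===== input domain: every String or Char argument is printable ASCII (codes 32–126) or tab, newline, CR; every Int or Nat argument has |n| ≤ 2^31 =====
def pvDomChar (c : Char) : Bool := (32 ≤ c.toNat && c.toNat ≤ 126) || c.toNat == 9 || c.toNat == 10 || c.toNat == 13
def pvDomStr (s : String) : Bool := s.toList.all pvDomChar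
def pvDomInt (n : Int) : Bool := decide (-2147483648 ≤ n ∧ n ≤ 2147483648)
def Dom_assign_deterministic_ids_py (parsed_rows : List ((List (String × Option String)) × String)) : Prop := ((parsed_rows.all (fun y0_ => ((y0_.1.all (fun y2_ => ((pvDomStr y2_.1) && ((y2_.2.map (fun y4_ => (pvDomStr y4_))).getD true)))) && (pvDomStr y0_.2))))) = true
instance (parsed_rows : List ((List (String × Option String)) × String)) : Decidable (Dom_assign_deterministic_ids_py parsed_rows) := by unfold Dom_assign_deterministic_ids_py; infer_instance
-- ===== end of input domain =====

-- B replaces A's dict-of-lists grouping with deduped prefixes + per-prefix filtering (alternative decomposition,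
-- same cost in practice since the prefix alphabet is tiny); equivalence proved on rows whose payload has a
-- "business_name" key (A raises KeyError otherwise).

-- ===== PORT A =====
-- str(v) for v : Optional[str]
def pyStrOfOptStr : Option String → String
  | some s => s
  | none => "None"

def norm_state_key (state_db : Option String) : Option String :=
  match state_db with
  | none => none
  | some st =>
    let s := PySem.Str.upper (PySem.Str.strip st)
    if s = "" then none else some s

-- payload["business_name"] raises KeyError when the key is absent; Pre_ excludes that,
-- and the port returns str(None) there (unreachable under Pre_).
def natural_key_from_payload (payload : List (String × Option String)) : String × Option String :=
  let d := PySem.Dict.ofList payload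
  (pyStrOfOptStr ((d.get? "business_name").getD none),
   norm_state_key ((d.get? "state").getD none))

-- f"PHO-{prefix}-{i:06d}" (i ≥ 1 here, so zfill = %06d)
def fmtId (pfx : String) (i : Int) : String :=
  "PHO-" ++ pfx ++ "-" ++ PySem.Str.zfill (PySem.Int.toStr i) 6

-- by_prefix.setdefault(id_prefix, []).append(nk)
def aByPrefix (parsed_rows : List ((List (String × Option String)) × String)) :
    PySem.Dict String (List (String × Option String)) :=
  parsed_rows.foldl (fun d r => d.modify r.2 [] (fun l => l ++ [natural_key_from_payload r.1]))
    PySem.Dict.empty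

-- for prefix in by_prefix: by_prefix[prefix].sort(key=lambda x: (x[0].lower(), x[1] or ""))
def aSortedDict (parsed_rows : List ((List (String × Option String)) × String)) :
    PySem.Dict String (List (String × Option String)) :=
  PySem.Dict.mk ((aByPrefix parsed_rows).items.map
    (fun kv => (kv.1, PySem.List.sorted2 kv.2 (fun x => PySem.Str.lower x.1) (fun x => x.2.getD ""))))

def assign_deterministic_ids_py (parsed_rows : List ((List (String × Option String)) × String)) : List (String × Option String × String) :=
  let out : PySem.Dict (String × Option String) String :=
    (aSortedDict parsed_rows).items.foldl
      (fun out kv => (PySem.List.enumerate kv.2 1).foldl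
        (fun out p => out.insert p.2 (fmtId kv.1 p.1)) out)
      PySem.Dict.empty
  out.items.map (fun p => (p.1.1, p.1.2, p.2))

-- ===== PORT B =====
-- the flat list of ((bn, st), id_prefix); nk computed inline as in Source B
def bNks (parsed_rows : List ((List (String × Option String)) × String)) :
    List ((String × Option String) × String) :=
  parsed_rows.foldl (fun acc r =>
    let d := PySem.Dict.ofList r.1
    let bn := pyStrOfOptStr ((d.get? "business_name").getD none)
    let st := match (d.get? "state").getD none with
              | none => none
              | some s =>
                let t := PySem.Str.upper (PySem.Str.strip s)
                if t = "" then none else some t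
    acc ++ [((bn, st), r.2)]) []

def assign_deterministic_ids_py_alt (parsed_rows : List ((List (String × Option String)) × String)) : List (String × Option String × String) :=
  let nks := bNks parsed_rows
  let prefixes := PySem.List.dedup (nks.map (fun q => q.2))
  let out : PySem.Dict (String × Option String) String :=
    prefixes.foldl (fun out pfx =>
      let group := PySem.List.sorted2 ((nks.filter (fun q => q.2 == pfx)).map (fun q => q.1))
        (fun x => PySem.Str.lower x.1) (fun x => x.2.getD "")
      (PySem.List.enumerate group 1).foldl
        (fun out p => out.insert p.2 ("PHO-" ++ pfx ++ "-" ++ PySem.Str.zfill (PySem.Int.toStr p.1) 6)) out)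
      PySem.Dict.empty
  out.items.map (fun p => (p.1.1, p.1.2, p.2))

-- ===== PRECONDITION & SPEC =====
-- Pre_ excludes exactly the rows whose payload lacks a "business_name" key, where A raises KeyError.
def Pre_assign_deterministic_ids_py (parsed_rows : List ((List (String × Option String)) × String)) : Prop :=
  ∀ r ∈ parsed_rows, (PySem.Dict.ofList r.1).contains "business_name" = true
instance (parsed_rows : List ((List (String × Option String)) × String)) : Decidable (Pre_assign_deterministic_ids_py parsed_rows) := by unfold Pre_assign_deterministic_ids_py; infer_instance

def pvWitness_assign_deterministic_ids_py : (List ((List (String × Option String)) × String)) :=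
  [([("business_name", some "Acme"), ("state", some " ny ")], "STATE"),
   ([("business_name", none)], "NAT"),
   ([("business_name", some "acme")], "STATE")]

def Spec_assign_deterministic_ids_py (parsed_rows : List ((List (String × Option String)) × String)) (out : List (String × Option String × String)) : Prop := out = assign_deterministic_ids_py_alt parsed_rows
instance (parsed_rows : List ((List (String × Option String)) × String)) (out : List (String × Option String × String)) : Decidable (Spec_assign_deterministic_ids_py parsed_rows out) := by unfold Spec_assign_deterministic_ids_py; infer_instance

-- ===== CLAIM (what is proved, stated in full; the proofs are below) =====
def Claim_equal_assign_deterministic_ids_py : Prop := ∀ (parsed_rows : List ((List (String × Option String)) × String)), Dom_assign_deterministic_ids_py parsed_rows → Pre_assign_deterministic_ids_py parsed_rows → Spec_assign_deterministic_ids_py parsed_rows (assign_deterministic_ids_py parsed_rows)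

-- ===== LEMMAS AND PROOFS =====

-- B's flat accumulation is the map of the per-row natural key
theorem bNks_eq_map (rows : List ((List (String × Option String)) × String)) :
    bNks rows = rows.map (fun r => (natural_key_from_payload r.1, r.2)) := by
  unfold bNks
  rw [PySem.List.foldl_append_singleton_eq_map]
  simp only [List.nil_append]
  refine List.map_congr_left (fun r _ => ?_)
  simp only [natural_key_from_payload, norm_state_key]

-- the group A's dict holds at key k
theorem aByPrefix_getD (rows : List ((List (String × Option String)) × String)) (k : String) :
    (aByPrefix rows).getD k [] =
      ((rows.map (fun r => (r.2, natural_key_from_payload r.1))).filter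
        (fun p => p.1 == k)).map (fun p => p.2) := by
  unfold aByPrefix
  rw [show (List.foldl (fun d (r : (List (String × Option String)) × String) =>
        d.modify r.2 [] fun l => l ++ [natural_key_from_payload r.1]) PySem.Dict.empty rows)
      = List.foldl (fun d (p : String × (String × Option String)) => d.modify p.1 [] fun l => l ++ [p.2])
          PySem.Dict.empty (rows.map (fun r => (r.2, natural_key_from_payload r.1)))
    from (List.foldl_map
      (f := fun (r : (List (String × Option String)) × String) => (r.2, natural_key_from_payload r.1))
      (g := fun (d : PySem.Dict String (List (String × Option String)))
          (p : String × (String × Option String)) => d.modify p.1 [] fun l => l ++ [p.2])).symm]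
  rw [PySem.Dict.getD_foldl_modify_append]
  simp [PySem.Dict.getD_empty]

theorem aByPrefix_keys (rows : List ((List (String × Option String)) × String)) :
    (aByPrefix rows).keys = PySem.List.dedup (rows.map (fun r => r.2)) := by
  unfold aByPrefix
  rw [PySem.Dict.keys_foldl_modify_key rows (fun r => r.2) []
    (fun _ r => fun l => l ++ [natural_key_from_payload r.1])]
  simp [PySem.List.dedup_eq_ofList, PySem.Dict.keys_empty, PySem.Set.update_nil_left]

theorem aByPrefix_keys_nodup (rows : List ((List (String × Option String)) × String)) :
    (aByPrefix rows).keys.Nodup := by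
  unfold aByPrefix
  exact PySem.Dict.nodup_keys_foldl_modify_key rows (fun r => r.2) []
    (fun _ r => fun l => l ++ [natural_key_from_payload r.1]) _ (by simp [PySem.Dict.keys_empty])

-- ===== VERDICT (by name: the statement is the Claim_ definition above) =====
theorem assign_deterministic_ids_py_spec : Claim_equal_assign_deterministic_ids_py := by
  intro rows _ _
  unfold Spec_assign_deterministic_ids_py assign_deterministic_ids_py assign_deterministic_ids_py_alt
  simp only []
  -- identify A's sorted items list with B's loop over deduped prefixes
  have hitems : (aSortedDict rows).items =
      (PySem.List.dedup (rows.map (fun r => r.2))).map (fun k =>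
        (k, PySem.List.sorted2 ((aByPrefix rows).getD k [])
          (fun x => PySem.Str.lower x.1) (fun x => x.2.getD ""))) := by
    unfold aSortedDict
    rw [show (PySem.Dict.mk ((aByPrefix rows).items.map
        (fun kv => (kv.1, PySem.List.sorted2 kv.2 (fun x => PySem.Str.lower x.1) (fun x => x.2.getD ""))))).items
      = (aByPrefix rows).items.map
        (fun kv => (kv.1, PySem.List.sorted2 kv.2 (fun x => PySem.Str.lower x.1) (fun x => x.2.getD ""))) from rfl]
    rw [PySem.Dict.items_eq_map_keys (aByPrefix rows) (aByPrefix_keys_nodup rows) []]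
    rw [aByPrefix_keys]
    simp [List.map_map, Function.comp]
  rw [hitems, List.foldl_map]
  rw [bNks_eq_map]
  have hpref : (rows.map (fun r => (natural_key_from_payload r.1, r.2))).map (fun q => q.2)
      = rows.map (fun r => r.2) := by simp [List.map_map, Function.comp]
  rw [hpref]
  congr 2
  apply PySem.List.foldl_congr_mem
  intro acc k _
  have hgroup : ((rows.map (fun r => (natural_key_from_payload r.1, r.2))).filter
        (fun q => q.2 == k)).map (fun q => q.1)
      = (aByPrefix rows).getD k [] := by
    rw [aByPrefix_getD]
    rw [List.filter_map, List.filter_map, List.map_map, List.map_map]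
    rfl
  rw [hgroup]
  rfl
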